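-- pv_equiv track=rewrite | github.com/nbeversl/urtext-sublime | urtext_folding.py | get_scope_for_folding
-- ===== SOURCE A (Python) =====
-- scopes_to_fold = [
--     'frame.urtext',
--     'entity.name.struct.datestamp.urtext',
--     'metadata_entry.urtext',
--     'compact_node.urtext',
--     'inline_node_5.urtext',
--     'inline_node_4.urtext',
--     'inline_node_3.urtext',
--     'inline_node_2.urtext',
--     'inline_node_as_metadata_1.urtext',
--     'inline_node_1.urtext',
--     ]
--
-- def get_scope_for_folding(scope_name):
--     for s in scopes_to_fold:
--         if s in scope_name:
--             if s == 'compact_node.urtext':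
--                 for t in scopes_to_fold:
--                     if t in scope_name and t != 'compact_node.urtext':
--                         return t
--             return s
-- ===== SOURCE B (Python) =====
-- scopes_to_fold = [
--     'frame.urtext',
--     'entity.name.struct.datestamp.urtext',
--     'metadata_entry.urtext',
--     'compact_node.urtext',
--     'inline_node_5.urtext',
--     'inline_node_4.urtext',
--     'inline_node_3.urtext',
--     'inline_node_2.urtext',
--     'inline_node_as_metadata_1.urtext',
--     'inline_node_1.urtext',
--     ]
--
-- def get_scope_for_folding(scope_name):
--     # Collect every matching scope keyed by (is-compact, position); the minimum
--     # key is the first non-compact match if one exists, else compact_node itself.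
--     matches = [(s == 'compact_node.urtext', i, s)
--                for i, s in enumerate(scopes_to_fold)
--                if s in scope_name]
--     if not matches:
--         return None
--     return min(matches)[2]
-- ===== Notes on version B (the rewrite author's own statement) =====
-- stated objective: alternative
-- what changed: Replaces A's early-return nested scan with a collect-then-select scheme: build the full list of matching scopes keyed by (is-compact, index) and return the minimum key's scope, so compact_node demotion falls out of the key order instead of control flow.
import Mathlib
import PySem

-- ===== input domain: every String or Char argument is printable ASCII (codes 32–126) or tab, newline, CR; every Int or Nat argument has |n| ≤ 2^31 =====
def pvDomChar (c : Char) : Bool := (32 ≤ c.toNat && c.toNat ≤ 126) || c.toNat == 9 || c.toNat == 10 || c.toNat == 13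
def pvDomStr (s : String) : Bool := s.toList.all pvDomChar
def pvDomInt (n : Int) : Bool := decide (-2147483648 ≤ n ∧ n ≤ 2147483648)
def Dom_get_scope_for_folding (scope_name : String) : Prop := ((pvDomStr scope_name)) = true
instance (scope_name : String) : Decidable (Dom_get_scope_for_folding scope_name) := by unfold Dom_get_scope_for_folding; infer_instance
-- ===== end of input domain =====

-- B replaces A's early-return nested scan with collect-then-select: list all matching
-- scopes keyed by (is-compact, index) and return the minimum key's scope (alternative).


def scopes_to_fold : List String := [
    "frame.urtext",
    "entity.name.struct.datestamp.urtext",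
    "metadata_entry.urtext",
    "compact_node.urtext",
    "inline_node_5.urtext",
    "inline_node_4.urtext",
    "inline_node_3.urtext",
    "inline_node_2.urtext",
    "inline_node_as_metadata_1.urtext",
    "inline_node_1.urtext"]

-- ===== PORT A =====
-- A's inner loop: first t in the list with t in scope_name and t ≠ compact
def pvInnerA (scope_name : String) : List String → Option String
  | [] => none
  | t :: rest =>
    if PySem.Str.isIn t scope_name ∧ t ≠ "compact_node.urtext" then some t
    else pvInnerA scope_name rest

-- A's outer loop
def pvOuterA (scope_name : String) : List String → Option String
  | [] => none
  | s :: rest =>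
    if PySem.Str.isIn s scope_name then
      if s = "compact_node.urtext" then
        match pvInnerA scope_name scopes_to_fold with
        | some t => some t
        | none => some s        -- inner loop falls through; 'return s'
      else some s
    else pvOuterA scope_name rest

def get_scope_for_folding (scope_name : String) : Option String :=
  pvOuterA scope_name scopes_to_fold

-- ===== PORT B =====
-- Python's tuple '<' on (bool, int, str): lexicographic, False < True
def pvTripLt (x y : Bool × Int × String) : Bool :=
  if x.1 ≠ y.1 then x.1 == false
  else if x.2.1 ≠ y.2.1 then x.2.1 < y.2.1
  else x.2.2 < y.2.2

-- the comprehension: [(s == compact, i, s) for i, s in enumerate(scopes_to_fold) if s in scope_name]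
def pvMatches (scope_name : String) : List (Bool × Int × String) :=
  ((PySem.List.enumerate scopes_to_fold 0).filter
      (fun p => PySem.Str.isIn p.2 scope_name)).map
    (fun p => (p.2 == "compact_node.urtext", p.1, p.2))

-- Python min over tuples: first element with the minimal key (strict-less fold)
def get_scope_for_folding_alt (scope_name : String) : Option String :=
  match pvMatches scope_name with
  | [] => none
  | h :: t => some ((t.foldl (fun m x => if pvTripLt x m then x else m) h).2.2)

-- ===== PRECONDITION & SPEC =====
def Spec_get_scope_for_folding (scope_name : String) (out : Option String) : Prop := out = get_scope_for_folding_alt scope_name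
instance (scope_name : String) (out : Option String) : Decidable (Spec_get_scope_for_folding scope_name out) := by unfold Spec_get_scope_for_folding; infer_instance

-- ===== CLAIM (what is proved, stated in full; the proofs are below) =====
def Claim_equal_get_scope_for_folding : Prop := ∀ (scope_name : String), Dom_get_scope_for_folding scope_name → Spec_get_scope_for_folding scope_name (get_scope_for_folding scope_name)

-- ===== LEMMAS AND PROOFS =====

-- ===== VERDICT (by name: the statement is the Claim_ definition above) =====
set_option maxHeartbeats 1000000 in
theorem get_scope_for_folding_spec : Claim_equal_get_scope_for_folding := by
  intro scope_name _
  unfold Spec_get_scope_for_folding get_scope_for_folding get_scope_for_folding_alt pvMatches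
  simp only [scopes_to_fold, pvOuterA, pvInnerA, PySem.List.enumerate, List.filter]
  generalize PySem.Str.isIn "frame.urtext" scope_name = b0
  generalize PySem.Str.isIn "entity.name.struct.datestamp.urtext" scope_name = b1
  generalize PySem.Str.isIn "metadata_entry.urtext" scope_name = b2
  generalize PySem.Str.isIn "compact_node.urtext" scope_name = b3
  generalize PySem.Str.isIn "inline_node_5.urtext" scope_name = b4
  generalize PySem.Str.isIn "inline_node_4.urtext" scope_name = b5
  generalize PySem.Str.isIn "inline_node_3.urtext" scope_name = b6
  generalize PySem.Str.isIn "inline_node_2.urtext" scope_name = b7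
  generalize PySem.Str.isIn "inline_node_as_metadata_1.urtext" scope_name = b8
  generalize PySem.Str.isIn "inline_node_1.urtext" scope_name = b9
  revert b0 b1 b2 b3 b4 b5 b6 b7 b8 b9
  decide
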